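-- pv_equiv track=rewrite | github.com/koba925/alds | atcoder/ABC136/D.py | solve_tle
-- ===== SOURCE A (Python) =====
-- def solve_tle(s):
--     nums = [1] * len(s)
--     prev_nums = None
--     prev_prev_nums = None
--     even_times = True
--     while nums != prev_nums and nums != prev_prev_nums:
--         new_nums = [0] * len(s)
--         for i, dir in enumerate(s):
--             if dir == "R":
--                 new_nums[i + 1] += nums[i]
--             else:
--                 new_nums[i - 1] += nums[i]
--         prev_prev_nums = prev_nums
--         prev_nums = nums
--         nums = new_nums
--         even_times = not even_times
--     return nums if even_times else prev_nums
-- ===== SOURCE B (Python) =====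
-- def solve_tle(s):
--     n = len(s)
--     if n == 0:
--         return []
--     # one movement step as a destination table
--     dest = [(i + 1) if c == "R" else (i - 1) % n for i, c in enumerate(s)]
--     # square the table (binary lifting) until the exponent is even and >= 2*n,
--     # by which time every child sits in its final 2-cycle
--     steps = 1
--     while steps < 2 * n or steps % 2 == 1:
--         dest = [dest[d] for d in dest]
--         steps *= 2
--     res = [0] * n
--     for d in dest:
--         res[d] += 1
--     return res
-- ===== Notes on version B (the rewrite author's own statement) =====
-- stated objective: alternative
-- what changed: A repeatedly applies the full counting sweep until the configuration oscillates (worst-case O(n) sweeps); B instead builds the one-step destination table once, squares it (binary lifting) until the exponent is an even number >= 2n, and tallies the final destinations - on typical inputs A stops after few sweeps, so B is not measurably faster.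
-- outside the precondition, e.g. on solve_tle('R'): A raises IndexError, B raises IndexError
import Mathlib
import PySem

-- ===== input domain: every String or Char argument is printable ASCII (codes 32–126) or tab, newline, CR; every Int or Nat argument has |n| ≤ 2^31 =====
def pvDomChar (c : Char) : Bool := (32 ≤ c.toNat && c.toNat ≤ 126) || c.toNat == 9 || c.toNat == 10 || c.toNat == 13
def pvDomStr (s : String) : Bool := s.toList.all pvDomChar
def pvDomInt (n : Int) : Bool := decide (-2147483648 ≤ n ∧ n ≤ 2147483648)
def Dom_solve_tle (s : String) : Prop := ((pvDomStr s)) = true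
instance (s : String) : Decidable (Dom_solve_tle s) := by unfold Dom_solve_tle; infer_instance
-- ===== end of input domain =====

-- B replaces A's repeat-until-oscillation count simulation by binary lifting of the one-step
-- movement map (square the destination table until the exponent is an even number ≥ 2·n, then tally).


-- ===== PORT A =====
-- one pass of A's inner 'for i, dir in enumerate(s)' loop ('new_nums[i±1] += nums[i]';
-- pySetD/pyGetD are Python-exact incl. the negative index -1; the only out-of-range write, i+1 = n,
-- happens exactly where Python raises IndexError, which Pre_ excludes)
def pvStep (l : List Char) (v : List Int) : List Int :=
  (PySem.List.enumerate l 0).foldl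
    (fun new p =>
      if p.2 = 'R' then
        PySem.List.pySetD new (p.1 + 1) (PySem.List.pyGetD new (p.1 + 1) 0 + PySem.List.pyGetD v p.1 0)
      else
        PySem.List.pySetD new (p.1 - 1) (PySem.List.pyGetD new (p.1 - 1) 0 + PySem.List.pyGetD v p.1 0))
    (List.replicate l.length (0 : Int))

-- A's 'while nums != prev_nums and nums != prev_prev_nums' loop; fuel 2n+4 is enough:
-- inside Pre_ the configuration repeats within 2n+2 iterations (proved below)
def pvLoopA (l : List Char) : Nat → List Int → Option (List Int) → Option (List Int) → Bool → List Int
  | 0, _, _, _, _ => []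
  | fuel + 1, nums, prev, pprev, even =>
    if prev ≠ some nums ∧ pprev ≠ some nums then
      pvLoopA l fuel (pvStep l nums) (some nums) prev (!even)
    else if even then nums else prev.getD []

def solve_tle (s : String) : List Int :=
  pvLoopA s.toList (2 * s.toList.length + 4) (List.replicate s.toList.length (1 : Int)) none none true

-- ===== PORT B =====
-- '[(i + 1) if c == "R" else (i - 1) % n for i, c in enumerate(s)]'
def pvDest0 (l : List Char) : List Int :=
  (PySem.List.enumerate l 0).map
    (fun p => if p.2 = 'R' then p.1 + 1 else PySem.Int.mod (p.1 - 1) (l.length : Int))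

-- '[dest[d] for d in dest]'
def pvSquare (dest : List Int) : List Int := dest.map (fun d => PySem.List.pyGetD dest d 0)

-- 'while steps < 2 * n or steps % 2 == 1'; steps doubles each turn, so fuel n+2 is never exhausted
def pvLoopB (n : Nat) : Nat → List Int → Nat → List Int
  | 0, dest, _ => dest
  | fuel + 1, dest, steps =>
    if steps < 2 * n ∨ steps % 2 = 1 then pvLoopB n fuel (pvSquare dest) (steps * 2) else dest

-- 'res = [0] * n; for d in dest: res[d] += 1'
def pvCounts (n : Nat) (dest : List Int) : List Int :=
  dest.foldl (fun res d => PySem.List.pySetD res d (PySem.List.pyGetD res d 0 + 1))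
    (List.replicate n (0 : Int))

def solve_tle_alt (s : String) : List Int :=
  if s.toList.length = 0 then []
  else pvCounts s.toList.length (pvLoopB s.toList.length (s.toList.length + 2) (pvDest0 s.toList) 1)

-- ===== PRECONDITION & SPEC =====
-- Pre_ excludes exactly the inputs where A raises IndexError: a string ending in 'R'
-- (the write new_nums[i+1] falls off the list on the very first sweep).  B raises there too.
def Pre_solve_tle (s : String) : Prop := s.toList.getLast? ≠ some 'R'
instance (s : String) : Decidable (Pre_solve_tle s) := by unfold Pre_solve_tle; infer_instance
def pvWitness_solve_tle : String := "RRLRLL"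

def Spec_solve_tle (s : String) (out : List Int) : Prop := out = solve_tle_alt s
instance (s : String) (out : List Int) : Decidable (Spec_solve_tle s out) := by unfold Spec_solve_tle; infer_instance

-- ===== CLAIM (what is proved, stated in full; the proofs are below) =====
def Claim_equal_solve_tle : Prop := ∀ (s : String), Dom_solve_tle s → Pre_solve_tle s → Spec_solve_tle s (solve_tle s)

-- ===== LEMMAS AND PROOFS =====
theorem getD_set_ite (xs : List Int) (i j : Nat) (a : Int) :
    (xs.set i a).getD j 0 = if i = j ∧ i < xs.length then a else xs.getD j 0 := by
  simp only [List.getD_eq_getElem?_getD, List.getElem?_set]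
  split_ifs with h1 h2 h3 h4 <;> simp_all <;> omega

def gfun (l : List Char) (i : Nat) : Nat :=
  if l[i]? = some 'R' then i + 1 else if i = 0 then l.length - 1 else i - 1

theorem gfun_lt (l : List Char) (hPre : l.getLast? ≠ some 'R') (i : Nat) (hi : i < l.length) :
    gfun l i < l.length := by
  unfold gfun
  split_ifs with h1 h2
  · rcases Nat.lt_or_ge (i + 1) l.length with h | h
    · exact h
    · exfalso
      have hi' : i = l.length - 1 := by omega
      rw [List.getLast?_eq_getElem?] at hPre
      exact hPre (hi' ▸ h1)
  · omega
  · omega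

theorem iterate_lt (l : List Char) (hPre : l.getLast? ≠ some 'R') (t i : Nat) (hi : i < l.length) :
    (gfun l)^[t] i < l.length := by
  induction t with
  | zero => simpa
  | succ m ih => rw [Function.iterate_succ_apply']; exact gfun_lt l hPre _ ih

theorem noR_g (l : List Char) (hR' : ¬ 'R' ∈ l) (i : Nat) :
    gfun l i = if i = 0 then l.length - 1 else i - 1 := by
  unfold gfun
  have : l[i]? ≠ some 'R' := by
    intro h; exact hR' (List.mem_of_getElem? h)
  simp [this]

theorem stab_mono (l : List Char) (i t : Nat)
    (h : (gfun l)^[t + 2] i = (gfun l)^[t] i) (u : Nat) (hu : t ≤ u) :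
    (gfun l)^[u + 2] i = (gfun l)^[u] i := by
  induction u with
  | zero => have : t = 0 := by omega
            subst this; exact h
  | succ m ih =>
    rcases Nat.lt_or_ge t (m + 1) with h1 | h1
    · have hm := ih (by omega)
      have : m + 1 + 2 = (m + 2) + 1 := by omega
      rw [this, Function.iterate_succ_apply', hm]
      exact (Function.iterate_succ_apply' (gfun l) m i).symm
    · have : t = m + 1 := by omega
      subst this; exact h

theorem cyc_R (l : List Char) (p : Nat) (hp : l[p]? = some 'R') : gfun l p = p + 1 := by
  unfold gfun; simp [hp]

theorem cyc_L (l : List Char) (p : Nat) (hp : l[p]? ≠ some 'R') (h0 : p ≠ 0) :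
    gfun l p = p - 1 := by
  unfold gfun; simp [hp, h0]

theorem climbR (l : List Char) (hPre : l.getLast? ≠ some 'R') (d : Nat) :
    ∀ p, p < l.length → l[p]? = some 'R' → l.length - p ≤ d →
      ∃ t ≤ d, (gfun l)^[t + 2] p = (gfun l)^[t] p := by
  induction d with
  | zero =>
    intro p hp hR hd
    omega
  | succ m ih =>
    intro p hp hR hd
    have hplt : p + 1 < l.length := by
      have := gfun_lt l hPre p hp
      rwa [cyc_R l p hR] at this
    by_cases hnext : l[p + 1]? = some 'R'
    · obtain ⟨t, ht, hstab⟩ := ih (p + 1) hplt hnext (by omega)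
      refine ⟨t + 1, by omega, ?_⟩
      have h2 : (gfun l)^[t + 1 + 2] p = (gfun l)^[t + 2] (gfun l p) := by
        have e1 : t + 1 + 2 = (t + 2) + 1 := by omega
        rw [e1]; exact Function.iterate_succ_apply _ _ _
      rw [h2, cyc_R l p hR, hstab, ← cyc_R l p hR]
      exact (Function.iterate_succ_apply _ _ _).symm
    · refine ⟨0, by omega, ?_⟩
      show gfun l (gfun l p) = p
      rw [cyc_R l p hR, cyc_L l (p + 1) hnext (by omega), Nat.add_sub_cancel]

theorem descendL (l : List Char) (hPre : l.getLast? ≠ some 'R') (p : Nat) :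
    p < l.length → l[p]? ≠ some 'R' → (∃ m, m < p ∧ l[m]? = some 'R') →
      ∃ t ≤ p, (gfun l)^[t + 2] p = (gfun l)^[t] p := by
  induction p using Nat.strong_induction_on with
  | _ p ih =>
    intro hp hL ⟨m, hm, hmR⟩
    have h0 : p ≠ 0 := by omega
    by_cases hprev : l[p - 1]? = some 'R'
    · refine ⟨0, by omega, ?_⟩
      show gfun l (gfun l p) = p
      rw [cyc_L l p hL h0, cyc_R l (p - 1) hprev]
      omega
    · have hm' : m < p - 1 := by
        rcases Nat.lt_or_ge m (p - 1) with h | h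
        · exact h
        · exfalso; have : m = p - 1 := by omega
          exact hprev (this ▸ hmR)
      obtain ⟨t, ht, hstab⟩ := ih (p - 1) (by omega) (by omega) hprev ⟨m, hm', hmR⟩
      refine ⟨t + 1, by omega, ?_⟩
      have h2 : (gfun l)^[t + 1 + 2] p = (gfun l)^[t + 2] (gfun l p) := by
        have e1 : t + 1 + 2 = (t + 2) + 1 := by omega
        rw [e1]; exact Function.iterate_succ_apply _ _ _
      rw [h2, cyc_L l p hL h0, hstab, ← cyc_L l p hL h0]
      exact (Function.iterate_succ_apply _ _ _).symm

theorem descend0 (l : List Char) (i : Nat) (hi : i < l.length)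
    (h : ∀ m, m ≤ i → l[m]? ≠ some 'R') : (gfun l)^[i] i = 0 := by
  induction i with
  | zero => simp
  | succ m ih =>
    rw [Function.iterate_succ_apply, cyc_L l (m + 1) (h (m + 1) (by omega)) (by omega),
      Nat.add_sub_cancel]
    exact ih (by omega) (fun k hk => h k (by omega))

theorem reach (l : List Char) (hPre : l.getLast? ≠ some 'R') (hR : 'R' ∈ l)
    (i : Nat) (hi : i < l.length) :
    ∃ t ≤ 2 * l.length, (gfun l)^[t + 2] i = (gfun l)^[t] i := by
  by_cases hiR : l[i]? = some 'R'
  · obtain ⟨t, ht, hs⟩ := climbR l hPre l.length i hi hiR (by omega)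
    exact ⟨t, by omega, hs⟩
  · by_cases hbelow : ∃ m, m < i ∧ l[m]? = some 'R'
    · obtain ⟨t, ht, hs⟩ := descendL l hPre i hi hiR hbelow
      exact ⟨t, by omega, hs⟩
    · push_neg at hbelow
      have hall : ∀ m, m ≤ i → l[m]? ≠ some 'R' := by
        intro m hm
        rcases Nat.lt_or_ge m i with h | h
        · exact hbelow m h
        · have : m = i := by omega
          exact this ▸ hiR
      obtain ⟨mr, hmrR⟩ := List.mem_iff_getElem?.mp hR
      have hn2 : mr < l.length - 1 := by
        have hmrlt : mr < l.length := by
          rcases Nat.lt_or_ge mr l.length with h | h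
          · exact h
          · rw [List.getElem?_eq_none (by omega)] at hmrR; exact absurd hmrR (by simp)
        rcases Nat.lt_or_ge mr (l.length - 1) with h | h
        · exact h
        · exfalso
          rw [List.getLast?_eq_getElem?] at hPre
          have : mr = l.length - 1 := by omega
          exact hPre (this ▸ hmrR)
      have hlastL : l[l.length - 1]? ≠ some 'R' := by
        rw [List.getLast?_eq_getElem?] at hPre; exact hPre
      obtain ⟨t', ht', hs'⟩ := descendL l hPre (l.length - 1) (by omega) hlastL ⟨mr, hn2, hmrR⟩
      -- child i: descends to 0 in i steps, wraps to n-1 in one more, then as the n-1 child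
      have hreach : (gfun l)^[i + 1] i = l.length - 1 := by
        rw [Function.iterate_succ_apply', descend0 l i hi hall]
        unfold gfun
        simp [hall 0 (by omega), hlastL]
      refine ⟨i + 1 + t', by omega, ?_⟩
      have e1 : i + 1 + t' + 2 = (t' + 2) + (i + 1) := by omega
      have e2 : i + 1 + t' = t' + (i + 1) := by omega
      calc (gfun l)^[i + 1 + t' + 2] i
          = (gfun l)^[t' + 2] ((gfun l)^[i + 1] i) := by
            rw [e1]; exact Function.iterate_add_apply _ _ _ _
        _ = (gfun l)^[t'] (l.length - 1) := by rw [hreach, hs']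
        _ = (gfun l)^[t'] ((gfun l)^[i + 1] i) := by rw [hreach]
        _ = (gfun l)^[i + 1 + t'] i := by
            rw [e2]; exact (Function.iterate_add_apply _ _ _ _).symm

theorem stab_all (l : List Char) (hPre : l.getLast? ≠ some 'R') (hR : 'R' ∈ l)
    (i : Nat) (hi : i < l.length) (u : Nat) (hu : 2 * l.length ≤ u) :
    (gfun l)^[u + 2] i = (gfun l)^[u] i := by
  obtain ⟨t, ht, hs⟩ := reach l hPre hR i hi
  exact stab_mono l i t hs u (by omega)

theorem even_const (l : List Char) (hPre : l.getLast? ≠ some 'R') (hR : 'R' ∈ l)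
    (u u' : Nat) (hu : 2 * l.length ≤ u) (hu' : 2 * l.length ≤ u') (he : u % 2 = 0)
    (he' : u' % 2 = 0) (i : Nat) (hi : i < l.length) :
    (gfun l)^[u] i = (gfun l)^[u'] i := by
  have key : ∀ (m v : Nat), 2 * l.length ≤ v → (gfun l)^[v + 2 * m] i = (gfun l)^[v] i := by
    intro m
    induction m with
    | zero => intro v _; simp
    | succ mm ih =>
      intro v hv
      have e1 : v + 2 * (mm + 1) = (v + 2 * mm) + 2 := by omega
      rw [e1, stab_all l hPre hR i hi (v + 2 * mm) (by omega), ih v hv]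
  rcases Nat.lt_or_ge u' u with h | h
  · obtain ⟨m, hm⟩ : ∃ m, u = u' + 2 * m := ⟨(u - u') / 2, by omega⟩
    rw [hm, key m u' hu']
  · obtain ⟨m, hm⟩ : ∃ m, u' = u + 2 * m := ⟨(u' - u) / 2, by omega⟩
    rw [hm, key m u hu]

def stepBody (l : List Char) (v : List Int) (acc : List Int) (k : Nat) : List Int :=
  if PySem.List.pyGetD l (k : Int) ' ' = 'R' then
    PySem.List.pySetD acc ((k : Int) + 1)
      (PySem.List.pyGetD acc ((k : Int) + 1) 0 + PySem.List.pyGetD v (k : Int) 0)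
  else
    PySem.List.pySetD acc ((k : Int) - 1)
      (PySem.List.pyGetD acc ((k : Int) - 1) 0 + PySem.List.pyGetD v (k : Int) 0)

theorem pvStep_eq_fold (l : List Char) (v : List Int) :
    pvStep l v = (List.range l.length).foldl (stepBody l v) (List.replicate l.length (0 : Int)) := by
  unfold pvStep
  rw [PySem.List.enumerate_eq_map_pyRange l ' ', List.foldl_map,
    PySem.List.pyRange_one 0 (PySem.List.len l)]
  rw [List.foldl_map]
  have hlen : (((PySem.List.len l : Int)) - 0).toNat = l.length := by
    simp [PySem.List.len]
  rw [hlen]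
  apply PySem.List.foldl_congr_mem
  intro acc k hk
  simp only [zero_add]
  rfl

theorem pySetD_neg_one (xs : List Int) (x : Int) (h : xs.length ≠ 0) :
    PySem.List.pySetD xs (-1) x = xs.set (xs.length - 1) x := by
  simp only [PySem.List.pySetD, PySem.List.pySet?, PySem.List.pyIdx?]
  split_ifs with h1 h2 <;> simp_all <;> omega

theorem stepBody_getD (l : List Char) (hPre : l.getLast? ≠ some 'R') (v : List Int)
    (k : Nat) (hk : k < l.length) (acc : List Int) (hacc : acc.length = l.length) :
    (stepBody l v acc k).length = l.length ∧
    ∀ j, j < l.length → (stepBody l v acc k).getD j 0 =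
      acc.getD j 0 + (if gfun l k = j then v.getD k 0 else 0) := by
  have hget : PySem.List.pyGetD l (k : Int) ' ' = l[k] := by
    rw [PySem.List.pyGetD_natCast]; exact List.getD_eq_getElem l ' ' hk
  have hsome : l[k]? = some l[k] := List.getElem?_eq_getElem hk
  by_cases hc : l[k] = 'R'
  · have hcond : l[k]? = some 'R' := by rw [hsome, hc]
    have hg : gfun l k = k + 1 := cyc_R l k hcond
    have hglt : k + 1 < l.length := by have := gfun_lt l hPre k hk; rwa [hg] at this
    have e : stepBody l v acc k = acc.set (k + 1) (acc.getD (k + 1) 0 + v.getD k 0) := by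
      unfold stepBody
      rw [if_pos (by rw [hget]; exact hc)]
      have c1 : ((k : Int) + 1) = (((k + 1 : Nat)) : Int) := by push_cast; ring
      rw [c1, PySem.List.pySetD_natCast, PySem.List.pyGetD_natCast, PySem.List.pyGetD_natCast]
    constructor
    · rw [e]; simp [hacc]
    · intro j hj
      rw [e, getD_set_ite, hg]
      by_cases hjk : k + 1 = j
      · rw [if_pos ⟨hjk, by omega⟩, if_pos hjk, hjk]
      · rw [if_neg (by tauto), if_neg hjk, add_zero]
  · have hcond : l[k]? ≠ some 'R' := by rw [hsome]; simp [hc]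
    rcases Nat.eq_zero_or_pos k with hk0 | hk1
    · subst hk0
      have hn1 : l.length ≠ 0 := by omega
      have hg : gfun l 0 = l.length - 1 := by unfold gfun; simp [hcond]
      have e : stepBody l v acc 0 = acc.set (l.length - 1) (acc.getD (l.length - 1) 0 + v.getD 0 0) := by
        unfold stepBody
        rw [if_neg (by rw [hget]; exact hc)]
        norm_num
        have e2 : acc[acc.length - 1]'(by omega) = acc.getD (l.length - 1) 0 := by
          rw [List.getD_eq_getElem acc 0 (by omega)]
          congr 1
          omega
        rw [pySetD_neg_one acc _ (by omega), PySem.List.pyGetD_neg_ofNat acc 1 0 (by omega) (by omega),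
          PySem.List.pyGetD_zero, e2, show acc.length - 1 = l.length - 1 by omega]
        rfl
      constructor
      · rw [e]; simp [hacc]
      · intro j hj
        rw [e, getD_set_ite, hg]
        by_cases hjk : l.length - 1 = j
        · rw [if_pos ⟨hjk, by omega⟩, if_pos hjk, hjk]
        · rw [if_neg (by tauto), if_neg hjk, add_zero]
    · have hg : gfun l k = k - 1 := cyc_L l k hcond (by omega)
      have e : stepBody l v acc k = acc.set (k - 1) (acc.getD (k - 1) 0 + v.getD k 0) := by
        unfold stepBody
        rw [if_neg (by rw [hget]; exact hc)]
        have c1 : ((k : Int) - 1) = (((k - 1 : Nat)) : Int) := by omega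
        rw [c1, PySem.List.pySetD_natCast, PySem.List.pyGetD_natCast, PySem.List.pyGetD_natCast]
      constructor
      · rw [e]; simp [hacc]
      · intro j hj
        rw [e, getD_set_ite, hg]
        by_cases hjk : k - 1 = j
        · rw [if_pos ⟨hjk, by omega⟩, if_pos hjk, hjk]
        · rw [if_neg (by tauto), if_neg hjk, add_zero]

theorem stepFold_spec (l : List Char) (hPre : l.getLast? ≠ some 'R') (v : List Int)
    (ks : List Nat) (hks : ∀ k ∈ ks, k < l.length) :
    ∀ (acc : List Int), acc.length = l.length →
      (ks.foldl (stepBody l v) acc).length = l.length ∧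
      ∀ j, j < l.length → (ks.foldl (stepBody l v) acc).getD j 0 =
        acc.getD j 0 + ((ks.map (fun k => if gfun l k = j then v.getD k 0 else 0)).sum) := by
  induction ks with
  | nil => intro acc hacc; exact ⟨hacc, fun j hj => by simp⟩
  | cons k ks ih =>
    intro acc hacc
    have hk : k < l.length := hks k (by simp)
    obtain ⟨hL, hG⟩ := stepBody_getD l hPre v k hk acc hacc
    obtain ⟨ihL, ihG⟩ := ih (fun x hx => hks x (by simp [hx])) (stepBody l v acc k) hL
    refine ⟨ihL, fun j hj => ?_⟩
    rw [List.foldl_cons, ihG j hj, hG j hj, List.map_cons, List.sum_cons]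
    ring

def cntg (l : List Char) (t j : Nat) : Nat :=
  ((List.range l.length).filter (fun i => (gfun l)^[t] i = j)).length

theorem filter_len_card (n : Nat) (p : Nat → Bool) :
    ((List.range n).filter p).length = ((Finset.range n).filter (fun i => p i = true)).card := by
  induction n with
  | zero => simp
  | succ m ih =>
    rw [List.range_succ, List.filter_append, List.length_append, ih, Finset.range_add_one]
    by_cases h : p m = true <;>
      simp [h, Finset.filter_insert, Finset.card_insert_of_notMem, Finset.mem_filter]

theorem sum_map_range_eq (n : Nat) (f : Nat → Int) :
    ((List.range n).map f).sum = ∑ i ∈ Finset.range n, f i := by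
  induction n with
  | zero => simp
  | succ m ih => rw [List.range_succ, Finset.sum_range_succ, List.map_append, List.sum_append, ih]; simp

theorem cntg_card (l : List Char) (t j : Nat) :
    cntg l t j = ((Finset.range l.length).filter (fun i => (gfun l)^[t] i = j)).card := by
  unfold cntg
  rw [filter_len_card]
  simp

theorem step_spec (l : List Char) (hPre : l.getLast? ≠ some 'R') (v : List Int)
    (hv : v.length = l.length) :
    pvStep l v = (List.range l.length).map
      (fun j => (((List.range l.length).map (fun i => if gfun l i = j then v.getD i 0 else 0)).sum)) := by
  rw [pvStep_eq_fold]
  obtain ⟨hL, hG⟩ := stepFold_spec l hPre v (List.range l.length)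
    (fun k hk => List.mem_range.mp hk) (List.replicate l.length 0) (by simp)
  apply List.ext_getElem
  · rw [hL]; simp
  · intro j h1 h2
    have hj : j < l.length := by simpa using h2
    rw [List.getElem_map, List.getElem_range, ← List.getD_eq_getElem _ 0 h1, hG j hj]
    simp

theorem cnt_step (l : List Char) (hPre : l.getLast? ≠ some 'R') (k j : Nat) :
    (∑ i ∈ Finset.range l.length, (if gfun l i = j then (cntg l k i : Int) else 0)) =
      (cntg l (k + 1) j : Int) := by
  classical
  rw [cntg_card l (k + 1) j]
  rw [Finset.card_eq_sum_card_fiberwise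
    (f := fun m => (gfun l)^[k] m) (t := Finset.range l.length)
    (fun m hm => Finset.mem_range.mpr (iterate_lt l hPre k m (Finset.mem_range.mp (Finset.mem_filter.mp hm).1)))]
  push_cast
  apply Finset.sum_congr rfl
  intro i hi
  have hi' : i < l.length := Finset.mem_range.mp hi
  by_cases hgi : gfun l i = j
  · have hset : ((Finset.range l.length).filter (fun m => (gfun l)^[k + 1] m = j)).filter
        (fun m => (gfun l)^[k] m = i) =
        (Finset.range l.length).filter (fun m => (gfun l)^[k] m = i) := by
      ext m
      simp only [Finset.mem_filter, Finset.mem_range, Function.iterate_succ_apply']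
      constructor
      · rintro ⟨⟨hm, _⟩, h2⟩; exact ⟨hm, h2⟩
      · rintro ⟨hm, h2⟩; exact ⟨⟨hm, by rw [h2, hgi]⟩, h2⟩
    rw [if_pos hgi, cntg_card l k i, ← hset]
  · rw [if_neg hgi]
    have : ((Finset.range l.length).filter (fun m => (gfun l)^[k+1] m = j)).filter
        (fun m => (gfun l)^[k] m = i) = ∅ := by
      apply Finset.eq_empty_iff_forall_notMem.mpr
      intro m hm
      simp only [Finset.mem_filter, Finset.mem_range] at hm
      obtain ⟨⟨_, h1⟩, h2⟩ := hm
      rw [Function.iterate_succ_apply', h2] at h1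
      exact hgi h1
    rw [this]
    simp

def cK (l : List Char) : Nat → List Int
  | 0 => List.replicate l.length (1 : Int)
  | k + 1 => pvStep l (cK l k)

theorem cK_spec (l : List Char) (hPre : l.getLast? ≠ some 'R') (k : Nat) :
    cK l k = (List.range l.length).map (fun j => (cntg l k j : Int)) := by
  induction k with
  | zero =>
    rw [show cK l 0 = List.replicate l.length (1 : Int) from rfl]
    apply List.ext_getElem
    · simp
    · intro j h1 h2
      have hj : j < l.length := by simpa using h1
      rw [List.getElem_replicate, List.getElem_map, List.getElem_range]
      rw [cntg_card]
      simp only [Function.iterate_zero, id]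
      have hone : ∀ (inst : DecidablePred (fun i => i = j)),
          (Finset.range l.length).filter (fun i => i = j) = {j} := by
        intro inst
        ext m
        simp only [Finset.mem_filter, Finset.mem_range, Finset.mem_singleton]
        constructor
        · rintro ⟨_, h⟩; exact h
        · rintro rfl; exact ⟨hj, rfl⟩
      rw [hone _]
      simp
  | succ m ih =>
    show pvStep l (cK l m) = _
    have hlen : (cK l m).length = l.length := by rw [ih]; simp
    rw [step_spec l hPre (cK l m) hlen]
    apply List.map_congr_left
    intro j hj
    have hj' : j < l.length := List.mem_range.mp hj
    rw [sum_map_range_eq]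
    rw [← cnt_step l hPre m j]
    apply Finset.sum_congr rfl
    intro i hi
    have hi' : i < l.length := Finset.mem_range.mp hi
    rw [ih]
    by_cases h : gfun l i = j
    · rw [if_pos h, if_pos h, PySem.List.getD_map_range _ _ _ _ hi']
    · rw [if_neg h, if_neg h]

theorem cK_congr (l : List Char) (hPre : l.getLast? ≠ some 'R') (t t' : Nat)
    (h : ∀ i, i < l.length → (gfun l)^[t] i = (gfun l)^[t'] i) : cK l t = cK l t' := by
  rw [cK_spec l hPre t, cK_spec l hPre t']
  apply List.map_congr_left
  intro j hj
  unfold cntg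
  congr 1
  exact congrArg List.length
    (List.filter_congr (fun i hi => by simp [h i (List.mem_range.mp hi)]))

theorem cK_even_ge (l : List Char) (hPre : l.getLast? ≠ some 'R') (hR : 'R' ∈ l)
    (u : Nat) (hu : 2 * l.length ≤ u) (he : u % 2 = 0) : cK l u = cK l (2 * l.length) := by
  apply cK_congr l hPre
  intro i hi
  exact even_const l hPre hR u (2 * l.length) hu (by omega) he (by omega) i hi

theorem cK_per (l : List Char) (j k : Nat) (hjk : j ≤ k) (hp : cK l k = cK l (k - j)) :
    ∀ d, cK l (k - j + d + j) = cK l (k - j + d) := by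
  intro d
  induction d with
  | zero =>
    have e1 : k - j + 0 + j = k := by omega
    have e2 : k - j + 0 = k - j := by omega
    rw [e1, e2, hp]
  | succ m ih =>
    have e1 : k - j + (m + 1) + j = (k - j + m + j) + 1 := by omega
    have e2 : k - j + (m + 1) = (k - j + m) + 1 := by omega
    rw [e1, e2]
    show pvStep l (cK l (k - j + m + j)) = pvStep l (cK l (k - j + m))
    rw [ih]

theorem cK_stop (l : List Char) (hPre : l.getLast? ≠ some 'R') (hR : 'R' ∈ l)
    (j k e : Nat) (hj1 : 1 ≤ j) (hj2 : j ≤ 2) (hjk : j ≤ k) (hp : cK l k = cK l (k - j))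
    (he : e % 2 = 0) (he1 : k - j ≤ e) (he2 : e ≤ k) : cK l e = cK l (2 * l.length) := by
  rcases Nat.lt_or_ge e (2 * l.length) with hlt | hge
  · have hstep : ∀ u, k - j ≤ u → cK l (u + j) = cK l u := by
      intro u hu
      have := cK_per l j k hjk hp (u - (k - j))
      have e1 : k - j + (u - (k - j)) + j = u + j := by omega
      have e2 : k - j + (u - (k - j)) = u := by omega
      rwa [e1, e2] at this
    have chain : ∀ m, cK l (e + j * m) = cK l e := by
      intro m
      induction m with
      | zero => simp
      | succ mm ih =>
        have e1 : e + j * (mm + 1) = (e + j * mm) + j := by rw [Nat.mul_succ]; omega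
        rw [e1, hstep (e + j * mm) (by omega), ih]
    have hj12 : j = 1 ∨ j = 2 := by omega
    rcases hj12 with rfl | rfl
    · have := chain (2 * l.length - e)
      rw [show e + 1 * (2 * l.length - e) = 2 * l.length by omega] at this
      exact this.symm
    · have := chain ((2 * l.length - e) / 2)
      rw [show e + 2 * ((2 * l.length - e) / 2) = 2 * l.length by omega] at this
      exact this.symm
  · exact cK_even_ge l hPre hR e hge he

theorem loopA_run (l : List Char) (hPre : l.getLast? ≠ some 'R') (hR : 'R' ∈ l) :
    ∀ fuel k, k ≤ 2 * l.length + 2 → 2 * l.length + 3 ≤ fuel + k →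
      pvLoopA l fuel (cK l k) (if k = 0 then none else some (cK l (k - 1)))
        (if k ≤ 1 then none else some (cK l (k - 2))) (decide (k % 2 = 0)) =
      cK l (2 * l.length) := by
  intro fuel
  induction fuel with
  | zero => intro k hk hf; omega
  | succ f ihf =>
    intro k hk hf
    rw [pvLoopA]
    by_cases hcond : (if k = 0 then none else some (cK l (k - 1))) ≠ some (cK l k) ∧
        (if k ≤ 1 then none else some (cK l (k - 2))) ≠ some (cK l k)
    · rw [if_pos hcond]
      have hk1 : k ≤ 2 * l.length + 1 := by
        by_contra hcon
        have hk2 : k = 2 * l.length + 2 := by omega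
        subst hk2
        have heq : cK l (2 * l.length + 2) = cK l (2 * l.length) := by
          apply cK_congr l hPre
          intro i hi
          exact stab_all l hPre hR i hi (2 * l.length) (by omega)
        apply hcond.2
        rw [if_neg (by omega)]
        rw [show 2 * l.length + 2 - 2 = 2 * l.length by omega, ← heq]
      have e2 : (!decide (k % 2 = 0)) = decide ((k + 1) % 2 = 0) := by
        have h2 : k % 2 = 0 ∨ k % 2 = 1 := by omega
        rcases h2 with h2 | h2 <;> simp [h2, Nat.add_mod]
      have eP : (if k + 1 = 0 then none else some (cK l (k + 1 - 1))) = some (cK l k) := by simp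
      have ePP : (if k + 1 ≤ 1 then none else some (cK l (k + 1 - 2))) =
          (if k = 0 then none else some (cK l (k - 1))) := by
        rcases Nat.eq_zero_or_pos k with h | h
        · subst h; simp
        · rw [if_neg (by omega), if_neg (by omega)]
          congr 2
      have eS : pvStep l (cK l k) = cK l (k + 1) := rfl
      rw [eS, e2, ← eP, ← ePP]
      exact ihf (k + 1) (by omega) (by omega)
    · rw [if_neg hcond]
      rcases Decidable.not_and_iff_not_or_not.mp hcond with hP | hPP
      · -- prev = some nums : period 1
        have hk0 : k ≠ 0 := by
          intro h; subst h; simp at hP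
        have hper : cK l k = cK l (k - 1) := by
          rw [if_neg hk0] at hP
          have := Decidable.not_not.mp hP
          exact (Option.some.inj this).symm
        have h2 : k % 2 = 0 ∨ k % 2 = 1 := by omega
        rcases h2 with h2 | h2
        · rw [if_pos (by simp [h2])]
          exact cK_stop l hPre hR 1 k k (by omega) (by omega) (by omega) hper h2 (by omega) (by omega)
        · rw [if_neg (by simp [h2])]
          rw [if_neg hk0]
          show cK l (k - 1) = cK l (2 * l.length)
          exact cK_stop l hPre hR 1 k (k - 1) (by omega) (by omega) (by omega) hper (by omega) (by omega) (by omega)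
      · -- pprev = some nums : period 2
        have hk1 : ¬ (k ≤ 1) := by
          intro h; rw [if_pos h] at hPP; simp at hPP
        have hper : cK l k = cK l (k - 2) := by
          rw [if_neg hk1] at hPP
          have := Decidable.not_not.mp hPP
          exact (Option.some.inj this).symm
        have h2 : k % 2 = 0 ∨ k % 2 = 1 := by omega
        rcases h2 with h2 | h2
        · rw [if_pos (by simp [h2])]
          exact cK_stop l hPre hR 2 k k (by omega) (by omega) (by omega) hper h2 (by omega) (by omega)
        · rw [if_neg (by simp [h2])]
          rw [if_neg (by omega)]
          show cK l (k - 1) = cK l (2 * l.length)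
          exact cK_stop l hPre hR 2 k (k - 1) (by omega) (by omega) (by omega) hper (by omega) (by omega) (by omega)

theorem dest0_eval (l : List Char) :
    pvDest0 l = (List.range l.length).map (fun i => ((gfun l i : Nat) : Int)) := by
  unfold pvDest0
  rw [PySem.List.enumerate_eq_map_pyRange l ' ', List.map_map,
    PySem.List.pyRange_one 0 (PySem.List.len l)]
  have hlen : (((PySem.List.len l : Int)) - 0).toNat = l.length := by simp [PySem.List.len]
  rw [hlen, List.map_map]
  apply List.map_congr_left
  intro k hk
  have hklt : k < l.length := List.mem_range.mp hk
  simp only [Function.comp_apply, zero_add]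
  have hget : PySem.List.pyGetD l (k : Int) ' ' = l[k] := by
    rw [PySem.List.pyGetD_natCast]; exact List.getD_eq_getElem l ' ' hklt
  have hsome : l[k]? = some l[k] := List.getElem?_eq_getElem hklt
  by_cases hc : l[k] = 'R'
  · have hcond : l[k]? = some 'R' := by rw [hsome, hc]
    rw [hget, if_pos hc, cyc_R l k hcond]
    push_cast
    ring
  · have hcond : l[k]? ≠ some 'R' := by rw [hsome]; simp [hc]
    rw [hget, if_neg hc]
    rcases Nat.eq_zero_or_pos k with rfl | hk1
    · have hg : gfun l 0 = l.length - 1 := by unfold gfun; simp [hcond]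
      rw [hg]
      have hpos : (0 : Int) < (l.length : Int) := by
        have : l.length ≠ 0 := by omega
        omega
      rw [PySem.Int.mod_eq_emod_of_pos hpos]
      have e0 : ((0 : Nat) : Int) - 1 = -1 := by norm_num
      rw [e0]
      have hc2 : ((l.length - 1 : Nat) : Int) = (l.length : Int) - 1 := by omega
      rw [hc2]
      have e : (-1 : Int) % (l.length : Int) = ((l.length : Int) - 1) % (l.length : Int) := by
        rw [show ((l.length : Int) - 1) = -1 + (l.length : Int) * 1 by ring,
          Int.add_mul_emod_self_left]
      rw [e, Int.emod_eq_of_lt (by omega) (by omega)]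
    · have hg : gfun l k = k - 1 := cyc_L l k hcond (by omega)
      rw [hg]
      have c1 : ((k : Int) - 1) = (((k - 1 : Nat)) : Int) := by omega
      rw [c1, PySem.Int.mod_natCast]
      rw [Nat.mod_eq_of_lt (by omega)]

theorem square_map (n : Nat) (h : Nat → Nat) (hh : ∀ i, i < n → h i < n) :
    pvSquare ((List.range n).map (fun i => ((h i : Nat) : Int))) =
      (List.range n).map (fun i => ((h (h i) : Nat) : Int)) := by
  unfold pvSquare
  rw [List.map_map]
  apply List.map_congr_left
  intro i hi
  have hi' : i < n := List.mem_range.mp hi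
  simp only [Function.comp_apply]
  rw [PySem.List.pyGetD_natCast, PySem.List.getD_map_range _ _ _ _ (hh i hi')]

theorem loopB_eval (l : List Char) (hPre : l.getLast? ≠ some 'R') (hn : l.length ≠ 0) :
    ∀ (fuel a steps : Nat) (dest : List Int), steps = 2 ^ a →
      2 * l.length ≤ steps * 2 ^ fuel →
      dest = (List.range l.length).map (fun i => (((gfun l)^[steps] i : Nat) : Int)) →
      ∃ T, 2 * l.length ≤ T ∧ T % 2 = 0 ∧
        pvLoopB l.length fuel dest steps =
          (List.range l.length).map (fun i => (((gfun l)^[T] i : Nat) : Int)) := by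
  intro fuel
  induction fuel with
  | zero =>
    intro a steps dest hpow hbound hdest
    refine ⟨steps, by simpa using hbound, ?_, hdest⟩
    have ha : a ≠ 0 := by
      rintro rfl
      simp at hpow
      omega
    have : steps = 2 ^ (a - 1) * 2 := by
      rw [hpow, ← pow_succ]
      congr 1
      omega
    omega
  | succ f ihf =>
    intro a steps dest hpow hbound hdest
    rw [pvLoopB]
    by_cases hc : steps < 2 * l.length ∨ steps % 2 = 1
    · rw [if_pos hc]
      have hsq : pvSquare dest = (List.range l.length).map
          (fun i => (((gfun l)^[steps * 2] i : Nat) : Int)) := by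
        rw [hdest, square_map l.length ((gfun l)^[steps]) (fun i hi => iterate_lt l hPre steps i hi)]
        apply List.map_congr_left
        intro i hi
        have e : steps * 2 = steps + steps := by omega
        rw [e, Function.iterate_add_apply]
      exact ihf (a + 1) (steps * 2) (pvSquare dest)
        (by rw [hpow, pow_succ])
        (by have e : steps * 2 * 2 ^ f = steps * 2 ^ (f + 1) := by rw [pow_succ]; ring
            rw [e]; exact hbound)
        hsq
    · rw [if_neg hc]
      push_neg at hc
      exact ⟨steps, by omega, by omega, hdest⟩

theorem countsFold (n : Nat) (ds : List Int) (hds : ∀ d ∈ ds, ∃ k : Nat, k < n ∧ d = (k : Int)) :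
    ∀ (acc : List Int), acc.length = n →
      (ds.foldl (fun res d => PySem.List.pySetD res d (PySem.List.pyGetD res d 0 + 1)) acc).length = n ∧
      ∀ j, j < n →
        (ds.foldl (fun res d => PySem.List.pySetD res d (PySem.List.pyGetD res d 0 + 1)) acc).getD j 0 =
          acc.getD j 0 + (ds.countP (fun d => d = (j : Int)) : Int) := by
  induction ds with
  | nil => intro acc hacc; exact ⟨hacc, fun j hj => by simp⟩
  | cons d ds ih =>
    intro acc hacc
    obtain ⟨k, hk, rfl⟩ := hds d (by simp)
    have e : PySem.List.pySetD acc (k : Int) (PySem.List.pyGetD acc (k : Int) 0 + 1) =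
        acc.set k (acc.getD k 0 + 1) := by
      rw [PySem.List.pySetD_natCast, PySem.List.pyGetD_natCast]
    have hL : (acc.set k (acc.getD k 0 + 1)).length = n := by simp [hacc]
    obtain ⟨ihL, ihG⟩ := ih (fun x hx => hds x (by simp [hx])) (acc.set k (acc.getD k 0 + 1)) hL
    rw [List.foldl_cons, e]
    refine ⟨ihL, fun j hj => ?_⟩
    rw [ihG j hj, getD_set_ite]
    have hcnt : (List.countP (fun d => decide (d = (j : Int))) ((k : Int) :: ds) : Int) =
        (List.countP (fun d => decide (d = (j : Int))) ds : Int) + (if k = j then 1 else 0) := by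
      rw [List.countP_cons]
      by_cases hkj : k = j
      · subst hkj; simp
      · have hne : ¬ ((k : Int) = (j : Int)) := fun hc => hkj (by exact_mod_cast hc)
        simp [hne, hkj]
    rw [hcnt]
    by_cases hkj : k = j
    · subst hkj
      rw [if_pos ⟨rfl, by omega⟩, if_pos rfl]
      ring
    · rw [if_neg (by tauto), if_neg hkj]
      ring

theorem counts_eval (n : Nat) (h : Nat → Nat) (hh : ∀ i, i < n → h i < n) :
    pvCounts n ((List.range n).map (fun i => ((h i : Nat) : Int))) =
      (List.range n).map (fun j => ((((List.range n).filter (fun i => h i = j)).length : Nat) : Int)) := by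
  unfold pvCounts
  obtain ⟨hL, hG⟩ := countsFold n ((List.range n).map (fun i => ((h i : Nat) : Int)))
    (by intro d hd
        obtain ⟨i, hi, rfl⟩ := List.mem_map.mp hd
        exact ⟨h i, hh i (List.mem_range.mp hi), rfl⟩)
    (List.replicate n 0) (by simp)
  apply List.ext_getElem
  · rw [hL]; simp
  · intro j h1 h2
    have hj : j < n := by simpa using h2
    rw [List.getElem_map, List.getElem_range, ← List.getD_eq_getElem _ 0 h1, hG j hj]
    have hrep : (List.replicate n (0 : Int)).getD j 0 = 0 := by
      simp [List.getD_eq_getElem?_getD]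
    rw [hrep, zero_add, List.countP_map]
    congr 1
    rw [List.countP_eq_length_filter]
    congr 1
    apply List.filter_congr
    intro i hi
    exact decide_eq_decide.mpr Nat.cast_inj

theorem B_eval (s : String) (hPre : s.toList.getLast? ≠ some 'R') (hn : s.toList.length ≠ 0) :
    ∃ T, 2 * s.toList.length ≤ T ∧ T % 2 = 0 ∧
      solve_tle_alt s = (List.range s.toList.length).map (fun j => (cntg s.toList T j : Int)) := by
  unfold solve_tle_alt
  rw [if_neg hn]
  have hd0 : pvDest0 s.toList = (List.range s.toList.length).map
      (fun i => (((gfun s.toList)^[1] i : Nat) : Int)) := by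
    rw [dest0_eval]
    apply List.map_congr_left
    intro i _
    rw [Function.iterate_one]
  have hpow : 2 * s.toList.length ≤ 1 * 2 ^ (s.toList.length + 2) := by
    have h2 : s.toList.length < 2 ^ s.toList.length := Nat.lt_two_pow_self
    have e : 2 ^ (s.toList.length + 2) = 4 * 2 ^ s.toList.length := by ring
    omega
  obtain ⟨T, hT1, hT2, hEq⟩ := loopB_eval s.toList hPre hn (s.toList.length + 2) 0 1
    (pvDest0 s.toList) (by norm_num) hpow hd0
  refine ⟨T, hT1, hT2, ?_⟩
  rw [hEq, counts_eval s.toList.length ((gfun s.toList)^[T])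
    (fun i hi => iterate_lt s.toList hPre T i hi)]
  rfl

theorem cnt1 (l : List Char) (hPre : l.getLast? ≠ some 'R') (hR' : ¬ 'R' ∈ l)
    (t j : Nat) (hj : j < l.length) : cntg l t j = 1 := by
  classical
  have hinj : ∀ a b, a < l.length → b < l.length → gfun l a = gfun l b → a = b := by
    intro a b ha hb hab
    rw [noR_g l hR' a, noR_g l hR' b] at hab
    split_ifs at hab <;> omega
  have hiter : ∀ (u : Nat) (a b : Nat), a < l.length → b < l.length →
      (gfun l)^[u] a = (gfun l)^[u] b → a = b := by
    intro u
    induction u with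
    | zero => intro a b _ _ h; simpa using h
    | succ m ih =>
      intro a b ha hb h
      rw [Function.iterate_succ_apply', Function.iterate_succ_apply'] at h
      exact ih a b ha hb (hinj _ _ (iterate_lt l hPre m a ha) (iterate_lt l hPre m b hb) h)
  rw [cntg_card]
  -- the image of range n under g^[t] is all of range n
  have hsub : (Finset.range l.length).image ((gfun l)^[t]) ⊆ Finset.range l.length := by
    intro x hx
    obtain ⟨i, hi, rfl⟩ := Finset.mem_image.mp hx
    exact Finset.mem_range.mpr (iterate_lt l hPre t i (Finset.mem_range.mp hi))
  have hcard : ((Finset.range l.length).image ((gfun l)^[t])).card = l.length := by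
    rw [Finset.card_image_of_injOn
      (fun a ha b hb hab => hiter t a b (Finset.mem_range.mp ha) (Finset.mem_range.mp hb) hab)]
    simp
  have himg : (Finset.range l.length).image ((gfun l)^[t]) = Finset.range l.length :=
    Finset.eq_of_subset_of_card_le hsub (by rw [hcard]; simp)
  have hjmem : j ∈ (Finset.range l.length).image ((gfun l)^[t]) := by
    rw [himg]; exact Finset.mem_range.mpr hj
  obtain ⟨i0, hi0, hi0j⟩ := Finset.mem_image.mp hjmem
  have hi0' : i0 < l.length := Finset.mem_range.mp hi0
  have : (Finset.range l.length).filter (fun i => (gfun l)^[t] i = j) = {i0} := by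
    ext m
    simp only [Finset.mem_filter, Finset.mem_range, Finset.mem_singleton]
    constructor
    · rintro ⟨hm, hmj⟩
      exact hiter t m i0 hm hi0' (by rw [hmj, hi0j])
    · rintro rfl
      exact ⟨hi0', hi0j⟩
  rw [this]
  simp

theorem noR_cK (l : List Char) (hPre : l.getLast? ≠ some 'R') (hR' : ¬ 'R' ∈ l) (t : Nat) :
    cK l t = List.replicate l.length (1 : Int) := by
  rw [cK_spec l hPre t]
  have : ∀ j ∈ List.range l.length, ((cntg l t j : Nat) : Int) = (1 : Int) := by
    intro j hj
    rw [cnt1 l hPre hR' t j (List.mem_range.mp hj)]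
    norm_num
  rw [List.map_congr_left this, List.map_const', List.length_range]

theorem A_noR (s : String) (hPre : s.toList.getLast? ≠ some 'R') (hR' : ¬ 'R' ∈ s.toList) :
    solve_tle s = List.replicate s.toList.length (1 : Int) := by
  unfold solve_tle
  rw [show 2 * s.toList.length + 4 = (2 * s.toList.length + 3) + 1 from rfl, pvLoopA]
  rw [if_pos (by simp)]
  have e1 : pvStep s.toList (List.replicate s.toList.length (1 : Int)) =
      List.replicate s.toList.length (1 : Int) := by
    have : List.replicate s.toList.length (1 : Int) = cK s.toList 0 := rfl
    rw [this, show pvStep s.toList (cK s.toList 0) = cK s.toList 1 from rfl]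
    rw [noR_cK s.toList hPre hR' 1]
    rfl
  rw [e1]
  rw [show 2 * s.toList.length + 3 = (2 * s.toList.length + 2) + 1 from rfl, pvLoopA]
  rw [if_neg (by simp)]
  simp

theorem final_assemble (s : String) (hPre : s.toList.getLast? ≠ some 'R') :
    solve_tle s = solve_tle_alt s := by
  rcases Nat.eq_zero_or_pos s.toList.length with hn | hn
  · have hl : s.toList = [] := List.length_eq_zero_iff.mp hn
    unfold solve_tle solve_tle_alt
    rw [hl]
    rfl
  · by_cases hR : 'R' ∈ s.toList
    · have hA : solve_tle s = cK s.toList (2 * s.toList.length) := by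
        unfold solve_tle
        exact loopA_run s.toList hPre hR (2 * s.toList.length + 4) 0 (by omega) (by omega)
      obtain ⟨T, hT1, hT2, hB⟩ := B_eval s hPre (by omega)
      rw [hA, hB, cK_spec s.toList hPre (2 * s.toList.length)]
      apply List.map_congr_left
      intro j hj
      congr 1
      unfold cntg
      congr 1
      apply List.filter_congr
      intro i hi
      have hi' := List.mem_range.mp hi
      have := even_const s.toList hPre hR (2 * s.toList.length) T (by omega) hT1
        (by omega) hT2 i hi'
      rw [this]
    · obtain ⟨T, hT1, hT2, hB⟩ := B_eval s hPre (by omega)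
      rw [A_noR s hPre hR, hB]
      have : ∀ j ∈ List.range s.toList.length, ((cntg s.toList T j : Nat) : Int) = (1 : Int) := by
        intro j hj
        rw [cnt1 s.toList hPre hR T j (List.mem_range.mp hj)]
        norm_num
      rw [List.map_congr_left this, List.map_const', List.length_range]

-- ===== VERDICT (by name: the statement is the Claim_ definition above) =====
theorem solve_tle_spec : Claim_equal_solve_tle := by
  intro s _ hPre
  show solve_tle s = solve_tle_alt s
  exact final_assemble s hPre
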